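-- pv_equiv track=rewrite | github.com/zhiqiang73-cpu/decidedplan | alpha/live_discovery.py | _slug_id_part
-- ===== SOURCE A (Python) =====
-- def _slug_id_part(text: object, max_len: int = 24) -> str:
--     raw = str(text or "card").lower()
--     chars = []
--     prev_sep = False
--     for ch in raw:
--         if ch.isalnum():
--             chars.append(ch)
--             prev_sep = False
--         elif not prev_sep:
--             chars.append("_")
--             prev_sep = True
--     slug = "".join(chars).strip("_")
--     return (slug or "card")[:max_len]
-- ===== SOURCE B (Python) =====
-- def _slug_id_part(text: object, max_len: int = 24) -> str:
--     raw = str(text or "card").lower()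
--     words = []
--     i, n = 0, len(raw)
--     while i < n:
--         if raw[i].isalnum():
--             j = i
--             while j < n and raw[j].isalnum():
--                 j += 1
--             words.append(raw[i:j])
--             i = j
--         else:
--             i += 1
--     slug = "_".join(words)
--     return (slug or "card")[:max_len]
-- ===== Notes on version B (the rewrite author's own statement) =====
-- stated objective: idiomatic
-- what changed: Replaces the char-by-char state machine (prev_sep flag, emit '_' then strip) by an index scan that collects maximal alphanumeric runs as words and joins them with '_', which collapses and trims separators by construction.
import Mathlib
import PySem

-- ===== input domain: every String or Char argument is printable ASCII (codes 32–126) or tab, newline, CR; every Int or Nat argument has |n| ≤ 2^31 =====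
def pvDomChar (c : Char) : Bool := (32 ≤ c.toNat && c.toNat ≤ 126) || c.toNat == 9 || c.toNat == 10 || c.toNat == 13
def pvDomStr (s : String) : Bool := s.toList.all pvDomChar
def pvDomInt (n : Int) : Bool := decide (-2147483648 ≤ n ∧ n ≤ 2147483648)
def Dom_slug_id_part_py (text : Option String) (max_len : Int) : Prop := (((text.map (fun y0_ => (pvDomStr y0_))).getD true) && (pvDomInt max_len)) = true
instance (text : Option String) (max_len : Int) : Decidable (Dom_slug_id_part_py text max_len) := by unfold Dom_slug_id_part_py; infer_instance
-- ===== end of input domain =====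

-- B replaces A's per-character prev_sep state machine by collecting maximal alphanumeric
-- runs as words and joining them with '_' (idiomatic; same O(n) cost).

-- ===== PORT A =====
-- chars is a list of single-character strings in Python; "".join(chars) is modelled by
-- keeping chars : List Char directly (exact).
def slug_id_part_py (text : Option String) (max_len : Int) : String :=
  let raw := PySem.Chars.lower (match text with
    | none => "card".toList
    | some s => if s = "" then "card".toList else s.toList)
  let st := raw.foldl (fun (st : List Char × Bool) ch =>
    if PySem.Chars.isalnum ch then (st.1 ++ [ch], false)
    else if st.2 = false then (st.1 ++ ['_'], true)
    else st) ([], false)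
  let slug := PySem.Chars.stripChars st.1 ['_']
  String.ofList (PySem.List.slice (if slug = [] then "card".toList else slug) none (some max_len))

-- ===== PORT B =====
-- the outer while loop of Source B: on an alphanumeric char the inner while scans the maximal
-- alphanumeric run raw[i:j] (takeWhile) and resumes at j (dropWhile); otherwise skip one char
def pvAltWords (l : List Char) : List (List Char) :=
  match l with
  | [] => []
  | c :: t =>
    if PySem.Chars.isalnum c then
      (c :: t.takeWhile PySem.Chars.isalnum) :: pvAltWords (t.dropWhile PySem.Chars.isalnum)
    else pvAltWords t
termination_by l.length
decreasing_by
  · have := t.length_dropWhile_le PySem.Chars.isalnum; simp; omega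
  · simp

def slug_id_part_py_alt (text : Option String) (max_len : Int) : String :=
  let raw := PySem.Chars.lower (match text with
    | none => "card".toList
    | some s => if s = "" then "card".toList else s.toList)
  let slug := PySem.Chars.join ['_'] (pvAltWords raw)
  String.ofList (PySem.List.slice (if slug = [] then "card".toList else slug) none (some max_len))

-- ===== PRECONDITION & SPEC =====
def Spec_slug_id_part_py (text : Option String) (max_len : Int) (out : String) : Prop := out = slug_id_part_py_alt text max_len
instance (text : Option String) (max_len : Int) (out : String) : Decidable (Spec_slug_id_part_py text max_len out) := by unfold Spec_slug_id_part_py; infer_instance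

-- ===== CLAIM (what is proved, stated in full; the proofs are below) =====
def Claim_equal_slug_id_part_py : Prop := ∀ (text : Option String) (max_len : Int), Dom_slug_id_part_py text max_len → Spec_slug_id_part_py text max_len (slug_id_part_py text max_len)

-- ===== LEMMAS AND PROOFS =====

-- what A's loop appends after consuming l starting from flag prev
def pvBody : List Char → Bool → List Char
  | [], _ => []
  | c :: t, prev =>
    if PySem.Chars.isalnum c then c :: pvBody t false
    else if prev then pvBody t true
    else '_' :: pvBody t true

def pvLead (l : List Char) : List Char :=
  match l with
  | [] => []
  | c :: _ => if PySem.Chars.isalnum c then [] else ['_']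

def pvTrail (l : List Char) : List Char :=
  if pvAltWords l = [] then []
  else match l.getLast? with
    | some c => if PySem.Chars.isalnum c then [] else ['_']
    | none => []

lemma pvFoldl_eq (l : List Char) : ∀ acc prev,
    (l.foldl (fun (st : List Char × Bool) ch =>
      if PySem.Chars.isalnum ch then (st.1 ++ [ch], false)
      else if st.2 = false then (st.1 ++ ['_'], true)
      else st) (acc, prev)).1 = acc ++ pvBody l prev := by
  induction l with
  | nil => intro acc prev; simp [pvBody]
  | cons c t ih =>
    intro acc prev
    simp only [List.foldl_cons, pvBody]
    by_cases h : PySem.Chars.isalnum c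
    · simp [h, ih]
    · cases prev <;> simp [h, ih]

lemma pvBody_false (l : List Char) : pvBody l false = pvLead l ++ pvBody l true := by
  cases l with
  | nil => rfl
  | cons c t => by_cases h : PySem.Chars.isalnum c <;> simp [pvBody, pvLead, h]

lemma pvRun (run rest : List Char) (h : ∀ x ∈ run, PySem.Chars.isalnum x = true) :
    pvBody (run ++ rest) false = run ++ pvBody rest false := by
  induction run with
  | nil => rfl
  | cons c t ih =>
    have hc := h c (by simp)
    simp [pvBody, hc, ih (fun x hx => h x (by simp [hx]))]

lemma pvDropWhile_head (l : List Char) (p : Char → Bool) :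
    ∀ c t, l.dropWhile p = c :: t → p c = false := by
  induction l with
  | nil => intro c t h; simp [List.dropWhile] at h
  | cons a l ih =>
    intro c t h
    by_cases ha : p a
    · rw [List.dropWhile_cons_of_pos ha] at h; exact ih c t h
    · rw [List.dropWhile_cons_of_neg ha] at h
      cases h; simpa using ha

lemma pvGetLast?_cons_ne_nil (c : Char) (t : List Char) (h : t ≠ []) :
    (c :: t).getLast? = t.getLast? := by
  simp [List.getLast?_cons, Option.getD]
  cases t with
  | nil => exact absurd rfl h
  | cons a s => simp [List.getLast?_cons]

lemma pvAltWords_eq_nil (l : List Char) :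
    pvAltWords l = [] ↔ ∀ x ∈ l, PySem.Chars.isalnum x = false := by
  induction l using pvAltWords.induct with
  | case1 => simp [pvAltWords]
  | case2 c t h ih =>
    simp only [pvAltWords, if_pos h]
    constructor
    · intro hn; exact (List.cons_ne_nil _ _ hn).elim
    · intro hall
      have hc := hall c (List.mem_cons_self)
      rw [hc] at h; cases h
  | case3 c t h ih =>
    simp only [pvAltWords, if_neg h]
    rw [ih]
    constructor
    · intro hall x hx
      rcases List.mem_cons.mp hx with rfl | hx
      · simpa using h
      · exact hall x hx
    · intro hall x hx; exact hall x (List.mem_cons_of_mem _ hx)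

lemma pvWords_good (l : List Char) :
    ∀ w ∈ pvAltWords l, (w ≠ [] ∧ ∀ x ∈ w, PySem.Chars.isalnum x = true) := by
  induction l using pvAltWords.induct with
  | case1 => simp [pvAltWords]
  | case2 c t h ih =>
    intro w hw
    simp only [pvAltWords, if_pos h] at hw
    rcases List.mem_cons.mp hw with rfl | hw
    · refine ⟨by simp, ?_⟩
      intro x hx
      rcases List.mem_cons.mp hx with rfl | hx
      · exact h
      · exact List.mem_takeWhile_imp hx
    · exact ih w hw
  | case3 c t h ih =>
    intro w hw
    simp only [pvAltWords, if_neg h] at hw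
    exact ih w hw

lemma pvJoin_head (ws : List (List Char))
    (hg : ∀ w ∈ ws, (w ≠ [] ∧ ∀ x ∈ w, PySem.Chars.isalnum x = true)) (hne : ws ≠ []) :
    ∃ c cs, PySem.Chars.join ['_'] ws = c :: cs ∧ PySem.Chars.isalnum c = true := by
  match ws with
  | [] => exact absurd rfl hne
  | w :: ws' =>
    obtain ⟨hwne, hwal⟩ := hg w (by simp)
    match w, hwne with
    | c :: cs, _ =>
      refine ⟨c, ?_, ?_, hwal c (by simp)⟩
      · match ws' with
        | [] => exact cs
        | w' :: rest => exact cs ++ '_' :: PySem.Chars.join ['_'] (w' :: rest)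
      · match ws' with
        | [] => simp [PySem.Chars.join_singleton]
        | w' :: rest => simp [PySem.Chars.join_cons_cons]

lemma pvJoin_last (ws : List (List Char))
    (hg : ∀ w ∈ ws, (w ≠ [] ∧ ∀ x ∈ w, PySem.Chars.isalnum x = true)) :
    ∀ c, (PySem.Chars.join ['_'] ws).getLast? = some c → PySem.Chars.isalnum c = true := by
  induction ws with
  | nil => intro c hc; simp [PySem.Chars.join_nil] at hc
  | cons w ws' ih =>
    intro c hc
    match ws' with
    | [] =>
      rw [PySem.Chars.join_singleton] at hc
      exact (hg w (by simp)).2 c (List.mem_of_getLast? hc)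
    | w' :: rest =>
      rw [PySem.Chars.join_cons_cons, List.append_assoc] at hc
      obtain ⟨c0, cs0, hj, _⟩ := pvJoin_head (w' :: rest)
        (fun x hx => hg x (by simp [hx])) (by simp)
      rw [List.getLast?_append_of_ne_nil w (by simp), List.singleton_append, hj,
        pvGetLast?_cons_ne_nil _ _ (by simp), ← hj] at hc
      exact ih (fun x hx => hg x (by simp [hx])) c hc

lemma pvBody_true (l : List Char) :
    pvBody l true = PySem.Chars.join ['_'] (pvAltWords l) ++ pvTrail l := by
  induction l using pvAltWords.induct with
  | case1 => simp [pvBody, pvAltWords, pvTrail, PySem.Chars.join_nil]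
  | case2 c t h ih =>
    -- c alphanumeric: the word is c :: takeWhile, the loop continues after dropWhile
    have hsplit : t = t.takeWhile PySem.Chars.isalnum ++ t.dropWhile PySem.Chars.isalnum :=
      (List.takeWhile_append_dropWhile).symm
    have hrun : ∀ x ∈ t.takeWhile PySem.Chars.isalnum, PySem.Chars.isalnum x = true :=
      fun x hx => List.mem_takeWhile_imp hx
    have h1 : pvBody (c :: t) true
        = c :: (t.takeWhile PySem.Chars.isalnum ++ pvBody (t.dropWhile PySem.Chars.isalnum) false) := by
      conv_lhs => rw [show (c :: t) = c :: (t.takeWhile PySem.Chars.isalnum ++ t.dropWhile PySem.Chars.isalnum) from by rw [← hsplit]]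
      simp only [pvBody, if_pos h]
      rw [pvRun _ _ hrun]
    have hW : pvAltWords (c :: t)
        = (c :: t.takeWhile PySem.Chars.isalnum) :: pvAltWords (t.dropWhile PySem.Chars.isalnum) := by
      simp only [pvAltWords, if_pos h]
    rw [h1, pvBody_false, ih, hW]
    rcases hrest : t.dropWhile PySem.Chars.isalnum with _ | ⟨r, r'⟩
    · -- no separator follows the run: t is entirely alphanumeric
      have htr : t = t.takeWhile PySem.Chars.isalnum := by
        conv_lhs => rw [hsplit, hrest]
        simp
      have hallt : ∀ x ∈ c :: t, PySem.Chars.isalnum x = true := by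
        intro x hx
        rcases List.mem_cons.mp hx with rfl | hx
        · exact h
        · exact hrun x (htr ▸ hx)
      have htrail : pvTrail (c :: t) = [] := by
        unfold pvTrail
        cases hgl : (c :: t).getLast? with
        | none => simp
        | some x =>
          have := hallt x (List.mem_of_getLast? hgl)
          simp [hW, this]
      rw [htrail]
      simp [pvAltWords, pvTrail, pvLead, PySem.Chars.join_singleton, PySem.Chars.join_nil]
    · -- a separator follows the run
      have hr : PySem.Chars.isalnum r = false := pvDropWhile_head t _ r r' hrest
      have hgl : (c :: t).getLast? = (r :: r').getLast? := by
        have ht : t ≠ [] := by rw [hsplit, hrest]; simp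
        rw [pvGetLast?_cons_ne_nil _ _ ht]
        conv_lhs => rw [hsplit, hrest]
        rw [List.getLast?_append_of_ne_nil _ (by simp)]
      rcases hws : pvAltWords (r :: r') with _ | ⟨w, ws⟩
      · -- everything after the run is separators
        have hallsep : ∀ x ∈ r :: r', PySem.Chars.isalnum x = false := (pvAltWords_eq_nil _).mp hws
        obtain ⟨x, e, hxf⟩ : ∃ x, (r :: r').getLast? = some x ∧ PySem.Chars.isalnum x = false := by
          cases e : (r :: r').getLast? with
          | none => rw [List.getLast?_eq_none_iff] at e; cases e
          | some x => exact ⟨x, rfl, hallsep x (List.mem_of_getLast? e)⟩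
        have htrail_ct : pvTrail (c :: t) = ['_'] := by
          unfold pvTrail
          rw [hW, hgl, hrest, hws, e]
          simp [hxf]
        have htrail_r : pvTrail (r :: r') = [] := by
          unfold pvTrail
          rw [hws]
          simp
        rw [htrail_ct, htrail_r]
        simp [pvLead, hr, PySem.Chars.join_singleton, PySem.Chars.join_nil]
      · -- more words follow
        have htrail_eq : pvTrail (c :: t) = pvTrail (r :: r') := by
          unfold pvTrail
          rw [hW, hgl, hrest, hws]
          simp
        rw [htrail_eq, PySem.Chars.join_cons_cons]
        simp [pvLead, hr, List.append_assoc]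
  | case3 c t h ih =>
    have h1 : pvBody (c :: t) true = pvBody t true := by simp [pvBody, h]
    have h2 : pvAltWords (c :: t) = pvAltWords t := by simp [pvAltWords, h]
    have h3 : pvTrail (c :: t) = pvTrail t := by
      unfold pvTrail
      rw [h2]
      by_cases hn : pvAltWords t = []
      · simp [hn]
      · have ht : t ≠ [] := by
          intro he; exact hn (by simp [he, pvAltWords])
        rw [pvGetLast?_cons_ne_nil _ _ ht]
    rw [h1, h2, h3, ih]

lemma pvStrip_eq (mid lead trail : List Char)
    (hlead : lead = [] ∨ lead = ['_']) (htrail : trail = [] ∨ trail = ['_'])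
    (hh : ∀ c cs, mid = c :: cs → PySem.Chars.isalnum c = true)
    (hl : ∀ c, mid.getLast? = some c → PySem.Chars.isalnum c = true)
    (hmt : mid = [] → trail = []) :
    PySem.Chars.stripChars (lead ++ mid ++ trail) ['_'] = mid := by
  cases mid with
  | nil =>
    rw [hmt rfl]
    rcases hlead with rfl | rfl <;> simp [PySem.Chars.stripChars, List.dropWhile]
  | cons m0 m' =>
    have hm0 : PySem.Chars.isalnum m0 = true := hh m0 m' rfl
    have hus : PySem.Chars.isalnum '_' = false := by decide
    have hm0ne : ¬ m0 = '_' := by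
      intro e; rw [e] at hm0; rw [hm0] at hus; cases hus
    obtain ⟨x, hx⟩ : ∃ x, (m0 :: m').getLast? = some x := by
      cases e : (m0 :: m').getLast? with
      | none => rw [List.getLast?_eq_none_iff] at e; cases e
      | some x => exact ⟨x, rfl⟩
    have hxal := hl x hx
    have hxne : ¬ x = '_' := by
      intro e; rw [e] at hxal; rw [hxal] at hus; cases hus
    simp only [PySem.Chars.stripChars]
    have step1 : List.dropWhile (fun c => List.contains ['_'] c) (lead ++ (m0 :: m') ++ trail)
        = (m0 :: m') ++ trail := by
      rcases hlead with rfl | rfl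
      · rw [List.nil_append, List.cons_append, List.dropWhile_cons_of_neg (by simp [hm0ne])]
      · rw [List.singleton_append, List.cons_append, List.cons_append,
          List.dropWhile_cons_of_pos (by simp),
          List.dropWhile_cons_of_neg (by simp [hm0ne])]
    rw [step1]
    have step2 : List.dropWhile (fun c => List.contains ['_'] c) ((m0 :: m') ++ trail).reverse
        = (m0 :: m').reverse := by
      rw [List.reverse_append]
      have hrc : ∀ y ys, (m0 :: m').reverse = y :: ys →
          List.dropWhile (fun c => List.contains ['_'] c) ((m0 :: m').reverse) = (m0 :: m').reverse := by
        intro y ys hrev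
        have hy : (m0 :: m').getLast? = some y := by
          rw [← List.head?_reverse, hrev]; rfl
        rw [hy] at hx
        cases hx
        rw [hrev, List.dropWhile_cons_of_neg (by simp [hxne])]
      obtain ⟨y, ys, hrev⟩ : ∃ y ys, (m0 :: m').reverse = y :: ys := by
        cases e : (m0 :: m').reverse with
        | nil => have := congrArg List.length e; simp at this
        | cons y ys => exact ⟨y, ys, rfl⟩
      rcases htrail with rfl | rfl
      · rw [List.reverse_nil, List.nil_append]
        exact hrc y ys hrev
      · rw [List.reverse_singleton, List.singleton_append,
          List.dropWhile_cons_of_pos (by simp)]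
        exact hrc y ys hrev
    rw [step2, List.reverse_reverse]

theorem slug_id_part_py_spec : Claim_equal_slug_id_part_py := by
  intro text max_len _
  unfold Spec_slug_id_part_py slug_id_part_py slug_id_part_py_alt
  dsimp only
  have key : ∀ m : List Char,
      PySem.Chars.stripChars
        (m.foldl (fun (st : List Char × Bool) ch =>
          if PySem.Chars.isalnum ch then (st.1 ++ [ch], false)
          else if st.2 = false then (st.1 ++ ['_'], true)
          else st) ([], false)).1 ['_']
      = PySem.Chars.join ['_'] (pvAltWords m) := by
    intro m
    rw [pvFoldl_eq m [] false, List.nil_append, pvBody_false, pvBody_true,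
      ← List.append_assoc]
    apply pvStrip_eq
    · unfold pvLead; cases m with
      | nil => exact Or.inl rfl
      | cons a s => by_cases h : PySem.Chars.isalnum a <;> simp [h]
    · unfold pvTrail
      by_cases hn : pvAltWords m = []
      · simp [hn]
      · rw [if_neg hn]
        cases m.getLast? with
        | none => exact Or.inl rfl
        | some x => by_cases h : PySem.Chars.isalnum x <;> simp [h]
    · intro c cs e
      by_cases hn : pvAltWords m = []
      · rw [hn, PySem.Chars.join_nil] at e; cases e
      · obtain ⟨c0, cs0, hj, hc0⟩ := pvJoin_head _ (pvWords_good m) hn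
        rw [hj] at e
        injection e with e1 _
        rw [← e1]; exact hc0
    · exact pvJoin_last _ (pvWords_good m)
    · intro e
      by_cases hn : pvAltWords m = []
      · unfold pvTrail; rw [if_pos hn]
      · obtain ⟨c0, cs0, hj, _⟩ := pvJoin_head _ (pvWords_good m) hn
        rw [hj] at e; cases e
  rw [key]
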